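-- pv_equiv track=rewrite | github.com/Anna325/MD_Goncharova | src/gikry/parser.py | clearEmptyTags
-- ===== SOURCE A (Python) =====
-- def clearEmptyTags(tags):
--     # ищем последний тег, который не пустой
--     normalIndex = -1
--     for index in range(len(tags)):
--         if tags[index] != '-':
--             normalIndex = index
--     if normalIndex >= 0:
--         return tags[0:normalIndex+1]
--     else:
--         return []
-- ===== SOURCE B (Python) =====
-- def clearEmptyTags(tags):
--     end = len(tags)
--     while end > 0 and tags[end - 1] == '-':
--         end -= 1
--     return tags[:end]
-- ===== Notes on version B (the rewrite author's own statement) =====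
-- stated objective: alternative
-- what changed: B finds the cutoff by a backward while-loop over only the trailing run of '-' tags and slices there, instead of A's full forward scan recording the last non-'-' index; the scan cost drops from n to the trailing run length, though slicing keeps overall cost similar.
import Mathlib
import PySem

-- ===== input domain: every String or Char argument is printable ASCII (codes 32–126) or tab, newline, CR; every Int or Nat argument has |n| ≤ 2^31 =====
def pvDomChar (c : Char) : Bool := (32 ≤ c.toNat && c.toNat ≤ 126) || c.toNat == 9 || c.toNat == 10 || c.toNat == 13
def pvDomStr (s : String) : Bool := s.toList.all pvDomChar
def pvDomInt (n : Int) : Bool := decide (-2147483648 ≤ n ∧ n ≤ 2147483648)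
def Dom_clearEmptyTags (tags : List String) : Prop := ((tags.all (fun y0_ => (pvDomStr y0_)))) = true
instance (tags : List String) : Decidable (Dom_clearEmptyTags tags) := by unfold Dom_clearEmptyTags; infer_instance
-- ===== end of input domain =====

-- B trims the trailing '-' run by a backward scan + slice instead of A's forward scan; return value only, no mutation in either.

-- ===== PORT A =====
-- A's loop: normalIndex = -1; for index in range(len(tags)): if tags[index] != '-': normalIndex = index
def clearLoopA (tags : List String) (n : Nat) : Int :=
  (List.range n).foldl (fun ni i => if tags.getD i "" ≠ "-" then (i : Int) else ni) (-1)

def clearEmptyTags (tags : List String) : List String :=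
  let normalIndex := clearLoopA tags tags.length
  if normalIndex ≥ 0 then PySem.List.slice tags (some 0) (some (normalIndex + 1)) else []

-- ===== PORT B =====
-- B's while loop: while end > 0 and tags[end-1] == '-': end -= 1
def findEndB (tags : List String) : Nat → Nat
  | 0 => 0
  | e + 1 => if tags.getD e "" == "-" then findEndB tags e else e + 1

def clearEmptyTags_alt (tags : List String) : List String :=
  tags.take (findEndB tags tags.length)

-- ===== PRECONDITION & SPEC =====
def Spec_clearEmptyTags (tags : List String) (out : List String) : Prop := out = clearEmptyTags_alt tags
instance (tags : List String) (out : List String) : Decidable (Spec_clearEmptyTags tags out) := by unfold Spec_clearEmptyTags; infer_instance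

-- ===== CLAIM (what is proved, stated in full; the proofs are below) =====
def Claim_equal_clearEmptyTags : Prop := ∀ (tags : List String), Dom_clearEmptyTags tags → Spec_clearEmptyTags tags (clearEmptyTags tags)

-- ===== LEMMAS AND PROOFS =====

theorem clearLoopA_succ (tags : List String) (n : Nat) :
    clearLoopA tags (n + 1) =
      if tags.getD n "" ≠ "-" then (n : Int) else clearLoopA tags n := by
  simp [clearLoopA, List.range_succ]

theorem clearLoopA_lt (tags : List String) (n : Nat) : clearLoopA tags n < n := by
  induction n with
  | zero => simp [clearLoopA]
  | succ n ih =>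
    rw [clearLoopA_succ]
    split <;> [omega; exact lt_trans ih (by omega)]

theorem clearLoopA_append (tags : List String) (t : String) (n : Nat) (h : n ≤ tags.length) :
    clearLoopA (tags ++ [t]) n = clearLoopA tags n := by
  induction n with
  | zero => rfl
  | succ n ih =>
    rw [clearLoopA_succ, clearLoopA_succ, ih (by omega),
      List.getD_append _ _ _ _ (by omega)]

theorem findEndB_le (tags : List String) (e : Nat) : findEndB tags e ≤ e := by
  induction e with
  | zero => simp [findEndB]
  | succ e ih =>
    rw [findEndB]
    split <;> omega

theorem findEndB_append (tags : List String) (t : String) (e : Nat) (h : e ≤ tags.length) :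
    findEndB (tags ++ [t]) e = findEndB tags e := by
  induction e with
  | zero => rfl
  | succ e ih =>
    rw [findEndB, findEndB, ih (by omega), List.getD_append _ _ _ _ (by omega)]

theorem clearEmptyTags_concat (tags : List String) (t : String) :
    clearEmptyTags (tags ++ [t]) =
      if t = "-" then clearEmptyTags tags else tags ++ [t] := by
  have hlen : (tags ++ [t]).length = tags.length + 1 := by simp
  have hget : (tags ++ [t]).getD tags.length "" = t := by
    simp [List.getD]
  by_cases ht : t = "-"
  · subst ht
    unfold clearEmptyTags
    rw [hlen, clearLoopA_succ, hget]
    simp only [ne_eq, not_true_eq_false, if_false]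
    rw [clearLoopA_append tags "-" tags.length le_rfl]
    have hlt := clearLoopA_lt tags tags.length
    by_cases hpos : clearLoopA tags tags.length ≥ 0
    · simp only [if_pos hpos]
      have h0 : (0 : Int) ≤ clearLoopA tags tags.length + 1 := by omega
      rw [PySem.List.slice_toNat (xs := tags ++ ["-"]) (by omega) (by omega),
          PySem.List.slice_toNat (xs := tags) (by omega) (by omega)]
      simp only [Int.toNat_zero, List.drop_zero, Nat.sub_zero]
      rw [List.take_append_of_le_length (by omega)]
      simp
    · simp [hpos]
  · simp only [ht, if_false]
    unfold clearEmptyTags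
    rw [hlen, clearLoopA_succ, hget]
    simp only [ne_eq, ht, not_false_eq_true, if_true]
    rw [if_pos (by positivity)]
    rw [PySem.List.slice_toNat (xs := tags ++ [t]) (by omega) (by positivity)]
    simp [hlen]

theorem clearEmptyTags_alt_concat (tags : List String) (t : String) :
    clearEmptyTags_alt (tags ++ [t]) =
      if t = "-" then clearEmptyTags_alt tags else tags ++ [t] := by
  have hlen : (tags ++ [t]).length = tags.length + 1 := by simp
  have hget : (tags ++ [t]).getD tags.length "" = t := by
    simp [List.getD]
  unfold clearEmptyTags_alt
  rw [hlen, findEndB, hget]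
  by_cases ht : t = "-"
  · subst ht
    simp only [beq_self_eq_true, if_true]
    rw [findEndB_append tags "-" tags.length le_rfl,
        List.take_append_of_le_length (findEndB_le tags tags.length)]
  · simp [ht]

theorem clearEmptyTags_eq (tags : List String) :
    clearEmptyTags tags = clearEmptyTags_alt tags := by
  induction tags using List.reverseRecOn with
  | nil => rfl
  | append_singleton tags t ih =>
    rw [clearEmptyTags_concat, clearEmptyTags_alt_concat, ih]

-- ===== VERDICT (by name: the statement is the Claim_ definition above) =====
theorem clearEmptyTags_spec : Claim_equal_clearEmptyTags := by
  intro tags _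
  exact clearEmptyTags_eq tags
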